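-- pv_equiv track=rewrite | github.com/Ren-hongchen/QRcode-learing | QRcode.py | CheckDataCode
-- ===== SOURCE A (Python) =====
-- def CheckDataCode(String,Index):   #检查数据码 拼接
--     Indexstring = ""
--     for x in Index:
--         Indexstring = Indexstring + x
--     datacode = String + Indexstring
--     length = len(datacode)
--     if 128-length >= 4:
--         datacode = datacode + '0000'
--         length = len(datacode)
--     if length < 128:
--         while(length % 8 != 0):
--             datacode = datacode + '0'
--             length = len(datacode)
--         if(length < 128):
--             i = 0
--             while(len(datacode) != 128):
--                 if(i%2 == 0):
--                     datacode = datacode + '11101100'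
--                 else:
--                     datacode = datacode + '00010001'
--                 i=i+1
--
--     return datacode
-- ===== SOURCE B (Python) =====
-- def CheckDataCode(String, Index):
--     # closed-form padding: byte-align with '0's, then slice a repeated 16-bit pad pattern
--     s = String + ''.join(Index)
--     if len(s) <= 124:
--         s = s + '0000'
--     if len(s) < 128:
--         s = s + '0' * ((8 - len(s) % 8) % 8)
--         need = 128 - len(s)
--         s = s + ('1110110000010001' * (need // 16 + 1))[:need]
--     return s
-- ===== Notes on version B (the rewrite author's own statement) =====
-- stated objective: simpler
-- what changed: Replaces A's three padding loops (char-by-char concatenation of Index, a while loop appending '0' to a byte boundary, and an alternating while loop appending 8-bit pad blocks until 128) with ''.join plus closed-form arithmetic: '0'*((8-len%8)%8) and a slice of the repeated 16-bit pad pattern.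
import Mathlib
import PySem

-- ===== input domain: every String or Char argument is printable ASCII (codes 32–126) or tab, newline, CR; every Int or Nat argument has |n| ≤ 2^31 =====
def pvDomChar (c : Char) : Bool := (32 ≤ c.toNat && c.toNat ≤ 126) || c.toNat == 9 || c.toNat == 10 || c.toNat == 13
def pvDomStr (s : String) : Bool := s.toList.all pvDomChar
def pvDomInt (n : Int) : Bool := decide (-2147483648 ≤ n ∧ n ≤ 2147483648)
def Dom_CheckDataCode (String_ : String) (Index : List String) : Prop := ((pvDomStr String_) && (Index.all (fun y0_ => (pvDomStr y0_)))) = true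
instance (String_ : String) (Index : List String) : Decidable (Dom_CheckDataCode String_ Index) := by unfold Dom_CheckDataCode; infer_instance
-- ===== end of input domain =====

-- B replaces A's three padding loops by closed-form arithmetic (replicate + a sliced repeated pattern); objective: simpler.

-- ===== PORT A =====
-- while(length % 8 != 0): datacode = datacode + '0'
def pvPadZeroA (dc : List Char) : List Char :=
  if dc.length % 8 ≠ 0 then pvPadZeroA (dc ++ ['0']) else dc
termination_by (8 - dc.length % 8) % 8
decreasing_by simp_all; omega

-- while(len(datacode) != 128): append '11101100'/'00010001' alternating; the 'dc.length < 128'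
-- guard (Python: len != 128) only makes the recursion total — inside A it is entered with
-- dc.length a multiple of 8 below 128, where the two conditions coincide.
def pvPadBlockA (dc : List Char) (i : Nat) : List Char :=
  if dc.length < 128 then
    pvPadBlockA (dc ++ (if i % 2 = 0 then "11101100".toList else "00010001".toList)) (i + 1)
  else dc
termination_by 128 - dc.length
decreasing_by simp; split <;> simp <;> omega

def CheckDataCode (String_ : String) (Index : List String) : String :=
  let Indexstring := Index.foldl (fun acc x => acc ++ x.toList) ([] : List Char)
  let datacode := String_.toList ++ Indexstring
  let length := datacode.length
  let datacode := if 128 - length ≥ 4 then datacode ++ "0000".toList else datacode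
  let length := datacode.length
  if length < 128 then
    let datacode := pvPadZeroA datacode
    if datacode.length < 128 then String.ofList (pvPadBlockA datacode 0)
    else String.ofList datacode
  else String.ofList datacode

-- ===== PORT B =====
def pvPat : List Char := "1110110000010001".toList

def CheckDataCode_alt (String_ : String) (Index : List String) : String :=
  let s := String_.toList ++ (Index.map String.toList).flatten   -- String + ''.join(Index)
  let s := if s.length ≤ 124 then s ++ "0000".toList else s
  if s.length < 128 then
    let s := s ++ List.replicate ((8 - s.length % 8) % 8) '0'
    let need := 128 - s.length
    String.ofList (s ++ (List.replicate (need / 16 + 1) pvPat).flatten.take need)  -- (pat * (need//16+1))[:need]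
  else String.ofList s

-- ===== PRECONDITION & SPEC =====
def Spec_CheckDataCode (String_ : String) (Index : List String) (out : String) : Prop := out = CheckDataCode_alt String_ Index
instance (String_ : String) (Index : List String) (out : String) : Decidable (Spec_CheckDataCode String_ Index out) := by unfold Spec_CheckDataCode; infer_instance

-- ===== CLAIM (what is proved, stated in full; the proofs are below) =====
def Claim_equal_CheckDataCode : Prop := ∀ (String_ : String) (Index : List String), Dom_CheckDataCode String_ Index → Spec_CheckDataCode String_ Index (CheckDataCode String_ Index)

-- ===== LEMMAS AND PROOFS =====
lemma pvPadZeroA_eq (dc : List Char) :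
    pvPadZeroA dc = dc ++ List.replicate ((8 - dc.length % 8) % 8) '0' := by
  generalize hm : (8 - dc.length % 8) % 8 = m
  induction m generalizing dc with
  | zero => rw [pvPadZeroA, if_neg (by omega)]; simp
  | succ m ih =>
      rw [pvPadZeroA, if_pos (by omega), ih _ (by simp; omega), List.replicate_succ]
      simp

-- the alternating-block loop, abstracted on the number of remaining 8-bit blocks
def pvAltK : Nat → Nat → List Char
  | 0, _ => []
  | k + 1, i => (if i % 2 = 0 then "11101100".toList else "00010001".toList) ++ pvAltK k (i + 1)

lemma pvPadBlockA_eq (k : Nat) (dc : List Char) (i : Nat)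
    (h : dc.length + 8 * k = 128) :
    pvPadBlockA dc i = dc ++ pvAltK k i := by
  induction k generalizing dc i with
  | zero => rw [pvPadBlockA, if_neg (by omega), pvAltK]; simp
  | succ k ih =>
      rw [pvPadBlockA, if_pos (by omega), ih _ _ (by split <;> simp <;> omega), pvAltK]
      split <;> simp

lemma pvAltK_closed : ∀ need < 129, need % 8 = 0 →
    pvAltK (need / 8) 0 = (List.replicate (need / 16 + 1) pvPat).flatten.take need := by
  decide

-- ===== VERDICT (by name: the statement is the Claim_ definition above) =====
-- both paddings of a common prefix agree
lemma pvTail_eq (s : List Char) :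
    (if s.length < 128 then
       if (pvPadZeroA s).length < 128 then String.ofList (pvPadBlockA (pvPadZeroA s) 0)
       else String.ofList (pvPadZeroA s)
     else String.ofList s)
    = (if s.length < 128 then
         String.ofList ((s ++ List.replicate ((8 - s.length % 8) % 8) '0') ++
           (List.replicate ((128 - (s ++ List.replicate ((8 - s.length % 8) % 8) '0').length) / 16 + 1) pvPat).flatten.take
             (128 - (s ++ List.replicate ((8 - s.length % 8) % 8) '0').length))
       else String.ofList s) := by
  by_cases h : s.length < 128
  · rw [if_pos h, if_pos h, pvPadZeroA_eq]
    by_cases h2 : (s ++ List.replicate ((8 - s.length % 8) % 8) '0').length < 128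
    · rw [if_pos h2,
        pvPadBlockA_eq ((128 - (s ++ List.replicate ((8 - s.length % 8) % 8) '0').length) / 8) _ 0
          (by simp at h2 ⊢; omega),
        pvAltK_closed _ (by simp at h2 ⊢; omega) (by simp at h2 ⊢; omega)]
    · rw [if_neg h2]
      have : 128 - (s ++ List.replicate ((8 - s.length % 8) % 8) '0').length = 0 := by
        simp at h2 ⊢; omega
      rw [this]
      simp
  · rw [if_neg h, if_neg h]

theorem CheckDataCode_spec : Claim_equal_CheckDataCode := by
  intro S Index _
  unfold Spec_CheckDataCode CheckDataCode CheckDataCode_alt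
  simp only [PySem.List.foldl_append_eq_flatMap, List.flatMap_def, List.nil_append]
  simp only [show (128 - (S.toList ++ (Index.map String.toList).flatten).length ≥ 4) ↔
        ((S.toList ++ (Index.map String.toList).flatten).length ≤ 124) from by omega]
  exact pvTail_eq _
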